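-- pv_equiv track=rewrite | github.com/BoAi01/RoboPack-Public | perception/utils_ros.py | find_messages_within_epsilon
-- ===== SOURCE A (Python) =====
-- def find_messages_within_epsilon(arrays, epsilon):
--     events = []
--
--     # Create a list of events for each array
--     for i, array in enumerate(arrays):
--         for j, timestamp in enumerate(array):
--             events.append((timestamp, i, j))
--
--     # Sort the events by timestamp
--     events.sort()
--
--     n = len(arrays)  # Number of lists
--     count = [0] * n  # Count of events from each array within epsilon
--
--     left_pointer = 0
--     result_indices = [-1] * n  # Initialize with -1 to indicate no matching element found yet
--
--     for right_pointer in range(len(events)):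
--         _, array_index, element_index = events[right_pointer]
--         count[array_index] += 1
--
--         # Remove events from the left side of the window
--         while events[right_pointer][0] - events[left_pointer][0] > epsilon:
--             count[events[left_pointer][1]] -= 1
--             left_pointer += 1
--
--         # Check if all arrays have events within epsilon
--         if all(count[i] > 0 for i in range(n)):
--             # Update the result indices for each array
--             result_indices[array_index] = element_index
--
--             # Check if all arrays have matching elements
--             if all(result_index != -1 for result_index in result_indices):
--                 return result_indices
--
--     return None  # No solution found
-- ===== SOURCE B (Python) =====
-- def find_messages_within_epsilon(arrays, epsilon):
--     # No sliding window, no left pointer, no per-array occurrence counts: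
--     # walk the time-sorted events once, remembering for each array only the
--     # LATEST timestamp seen so far.  The window ending at the current event
--     # covers every array iff each remembered latest timestamp is within
--     # epsilon of the current one (an older message of that array can never
--     # help if its latest one is already too old).
--     events = sorted((t, i, j)
--                     for i, array in enumerate(arrays)
--                     for j, t in enumerate(array))
--     n = len(arrays)
--     last = [None] * n        # latest timestamp of each array seen so far
--     result = [-1] * n
--     for t, i, j in events:
--         last[i] = t
--         if all(v is not None and t - v <= epsilon for v in last):
--             result[i] = j
--             if all(r != -1 for r in result):
--                 return result
--     return None
-- ===== Notes on version B (the rewrite author's own statement) =====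
-- stated objective: alternative
-- what changed: B abandons A's two-pointer sliding window with per-array occurrence counts entirely: it keeps only the latest timestamp seen for each array and decides coverage by comparing those latest timestamps against the current event's time, correct because within the sorted stream an array has a message in [t-eps, t] iff its latest message so far is at least t-eps.
import Mathlib
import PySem

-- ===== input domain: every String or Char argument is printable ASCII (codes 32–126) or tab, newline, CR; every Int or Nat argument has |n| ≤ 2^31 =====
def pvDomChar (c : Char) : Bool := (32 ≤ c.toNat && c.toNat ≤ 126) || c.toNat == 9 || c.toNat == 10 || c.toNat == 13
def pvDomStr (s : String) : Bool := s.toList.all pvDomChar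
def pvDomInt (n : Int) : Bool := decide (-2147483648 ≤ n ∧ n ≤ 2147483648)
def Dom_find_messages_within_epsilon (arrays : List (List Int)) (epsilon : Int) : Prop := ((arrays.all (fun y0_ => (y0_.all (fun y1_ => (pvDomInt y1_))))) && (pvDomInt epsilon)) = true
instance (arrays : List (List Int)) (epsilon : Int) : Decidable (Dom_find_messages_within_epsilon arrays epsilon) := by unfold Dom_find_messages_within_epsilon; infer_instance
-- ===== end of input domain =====

-- B drops A's two-pointer sliding window and occurrence counts: it tracks only the latest
-- timestamp per array along the sorted event stream and compares those against t - epsilon.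
-- Return-value equivalence; same asymptotic cost (objective: alternative).

-- ===== PORT A =====
-- events built by the two nested appending loops of A
def pvEventsA (arrays : List (List Int)) : List (Int × Int × Int) :=
  (PySem.List.enumerate arrays 0).foldl (fun ev p =>
    (PySem.List.enumerate p.2 0).foldl (fun ev2 q => ev2 ++ [(q.2, p.1, q.1)]) ev) []

-- the inner while loop: advance the left pointer while the window is wider than epsilon.
-- fuel = how far the pointer may still move (events.length suffices); when events[left]
-- is out of range Python raises IndexError — excluded by Pre_, here we just stop.
-- (indices stored in events come from enumerate, hence are ≥ 0, so .toNat is exact)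
def pvShrinkA (events : List (Int × Int × Int)) (epsilon t : Int) :
    Nat → List Int → Nat → List Int × Nat
  | 0, count, left => (count, left)
  | fuel + 1, count, left =>
    match events[left]? with
    | none => (count, left)
    | some e =>
      if epsilon < t - e.1 then
        pvShrinkA events epsilon t fuel
          (count.set e.2.1.toNat (count.getD e.2.1.toNat 0 - 1)) (left + 1)
      else (count, left)

-- the main for loop over events (rest = the events not yet visited by right_pointer)
def pvLoopA (events : List (Int × Int × Int)) (epsilon : Int) (n : Nat) :
    List (Int × Int × Int) → List Int → Nat → List Int → Option (List Int)
  | [], _, _, _ => none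
  | e :: rest, count, left, result =>
    let count1 := count.set e.2.1.toNat (count.getD e.2.1.toNat 0 + 1)
    let s := pvShrinkA events epsilon e.1 events.length count1 left
    if (List.range n).all (fun k => decide (0 < s.1.getD k 0)) then
      let result1 := result.set e.2.1.toNat e.2.2
      if result1.all (fun r => r != -1) then some result1
      else pvLoopA events epsilon n rest s.1 s.2 result1
    else pvLoopA events epsilon n rest s.1 s.2 result

def find_messages_within_epsilon (arrays : List (List Int)) (epsilon : Int) : Option (List Int) :=
  -- events.sort(): stable sort on key (t, i); within equal (t, i) the events were
  -- appended with j increasing, so this equals Python's full-tuple sort.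
  let events := PySem.List.sorted2 (pvEventsA arrays) (fun e => e.1) (fun e => e.2.1) false
  let n := arrays.length
  pvLoopA events epsilon n events (List.replicate n 0) 0 (List.replicate n (-1))

-- ===== PORT B =====
-- B's single pass: `last` holds the latest timestamp of each array seen so far (None = not seen);
-- the all(...) generator over `last` is ported as List.all over the Option entries.
def pvLoopB (epsilon : Int) :
    List (Int × Int × Int) → List (Option Int) → List Int → Option (List Int)
  | [], _, _ => none
  | e :: rest, last, result =>
    let last1 := last.set e.2.1.toNat (some e.1)
    if last1.all (fun v => match v with
                           | some w => decide (e.1 - w ≤ epsilon)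
                           | none => false) then
      let result1 := result.set e.2.1.toNat e.2.2
      if result1.all (fun r => r != -1) then some result1
      else pvLoopB epsilon rest last1 result1
    else pvLoopB epsilon rest last1 result

def find_messages_within_epsilon_alt (arrays : List (List Int)) (epsilon : Int) : Option (List Int) :=
  let events := PySem.List.sorted2
    ((PySem.List.enumerate arrays 0).flatMap (fun p =>
      (PySem.List.enumerate p.2 0).map (fun q => (q.2, p.1, q.1))))
    (fun e => e.1) (fun e => e.2.1) false
  let n := arrays.length
  pvLoopB epsilon events (List.replicate n none) (List.replicate n (-1))

-- ===== PRECONDITION & SPEC =====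
-- Pre_ excludes exactly the inputs where Python A raises IndexError: a negative epsilon
-- together with at least one nonempty array (the left pointer then runs past the end).
def Pre_find_messages_within_epsilon (arrays : List (List Int)) (epsilon : Int) : Prop :=
  0 ≤ epsilon ∨ ∀ a ∈ arrays, a = []
instance (arrays : List (List Int)) (epsilon : Int) : Decidable (Pre_find_messages_within_epsilon arrays epsilon) := by unfold Pre_find_messages_within_epsilon; infer_instance

def pvWitness_find_messages_within_epsilon : List (List Int) × Int := ([[0, 3], [1]], 2)

def Spec_find_messages_within_epsilon (arrays : List (List Int)) (epsilon : Int) (out : Option (List Int)) : Prop := out = find_messages_within_epsilon_alt arrays epsilon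
instance (arrays : List (List Int)) (epsilon : Int) (out : Option (List Int)) : Decidable (Spec_find_messages_within_epsilon arrays epsilon out) := by unfold Spec_find_messages_within_epsilon; infer_instance

-- ===== CLAIM (what is proved, stated in full; the proofs are below) =====
def Claim_equal_find_messages_within_epsilon : Prop := ∀ (arrays : List (List Int)) (epsilon : Int), Dom_find_messages_within_epsilon arrays epsilon → Pre_find_messages_within_epsilon arrays epsilon → Spec_find_messages_within_epsilon arrays epsilon (find_messages_within_epsilon arrays epsilon)

-- ===== LEMMAS AND PROOFS =====

-- the window ending at time t in the processed prefix `pre` covers all n arrays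
def pvGood (n : Nat) (eps : Int) (pre : List (Int × Int × Int)) (t : Int) : Bool :=
  (List.range n).all (fun i =>
    pre.any (fun x => x.2.1.toNat == i && decide (t - x.1 ≤ eps)))

-- reference loop: the good-window test recomputed from the processed prefix each step
def pvRef (eps : Int) (n : Nat) :
    List (Int × Int × Int) → List (Int × Int × Int) → List Int → Option (List Int)
  | _, [], _ => none
  | pre, e :: rest, result =>
    if pvGood n eps (pre ++ [e]) e.1 then
      let result1 := result.set e.2.1.toNat e.2.2
      if result1.all (fun r => r != -1) then some result1
      else pvRef eps n (pre ++ [e]) rest result1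
    else pvRef eps n (pre ++ [e]) rest result

-- ---- ordering of the sorted event list ----
def pvBefore (a b : Int × Int × Int) : Bool :=
  decide (a.1 < b.1) || (!decide (b.1 < a.1) && decide (a.2.1 < b.2.1))

lemma pvBefore_asymm (a b : Int × Int × Int) (h : pvBefore a b = true) :
    pvBefore b a = false := by
  rw [Bool.eq_false_iff]
  simp only [pvBefore, ne_eq, Bool.or_eq_true, Bool.and_eq_true, Bool.not_eq_true',
    decide_eq_true_eq, decide_eq_false_iff_not] at *
  omega

lemma pvBefore_cross (x y z : Int × Int × Int) (h1 : pvBefore x y = true)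
    (h2 : pvBefore z y = false) : pvBefore z x = false := by
  rw [Bool.eq_false_iff] at h2 ⊢
  simp only [pvBefore, ne_eq, Bool.or_eq_true, Bool.and_eq_true, Bool.not_eq_true',
    decide_eq_true_eq, decide_eq_false_iff_not] at *
  omega

lemma insertBy_pairwise (x : Int × Int × Int) (ys : List (Int × Int × Int))
    (h : ys.Pairwise (fun a b => pvBefore b a = false)) :
    (PySem.List.insertBy pvBefore x ys).Pairwise (fun a b => pvBefore b a = false) := by
  induction ys with
  | nil => simp [PySem.List.insertBy]
  | cons y ys ih =>
    rw [List.pairwise_cons] at h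
    by_cases hxy : pvBefore x y = true
    · rw [show PySem.List.insertBy pvBefore x (y :: ys) = x :: y :: ys by
        simp [PySem.List.insertBy, hxy]]
      refine List.Pairwise.cons ?_ (List.Pairwise.cons h.1 h.2)
      intro z hz
      rcases List.mem_cons.mp hz with rfl | hz'
      · exact pvBefore_asymm _ _ hxy
      · exact pvBefore_cross x y z hxy (h.1 z hz')
    · rw [show PySem.List.insertBy pvBefore x (y :: ys)
          = y :: PySem.List.insertBy pvBefore x ys by
        simp [PySem.List.insertBy, hxy]]
      refine List.Pairwise.cons ?_ (ih h.2)
      intro z hz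
      rcases (PySem.List.mem_insertBy pvBefore x z ys).mp hz with rfl | hz'
      · exact Bool.eq_false_iff.mpr hxy
      · exact h.1 z hz'

lemma foldl_insertBy_pairwise (xs acc : List (Int × Int × Int))
    (h : acc.Pairwise (fun a b => pvBefore b a = false)) :
    (xs.foldl (fun acc x => PySem.List.insertBy pvBefore x acc) acc).Pairwise
      (fun a b => pvBefore b a = false) := by
  induction xs generalizing acc with
  | nil => exact h
  | cons x xs ih => exact ih _ (insertBy_pairwise x acc h)

lemma sorted2_pairwise_fst (xs : List (Int × Int × Int)) :
    (PySem.List.sorted2 xs (fun e => e.1) (fun e => e.2.1) false).Pairwise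
      (fun a b => a.1 ≤ b.1) := by
  have h : (PySem.List.sorted2 xs (fun e => e.1) (fun e => e.2.1) false).Pairwise
      (fun a b => pvBefore b a = false) := by
    have : PySem.List.sorted2 xs (fun e => e.1) (fun e => e.2.1) false
        = xs.foldl (fun acc x => PySem.List.insertBy pvBefore x acc) [] := rfl
    rw [this]
    exact foldl_insertBy_pairwise xs [] (List.Pairwise.nil)
  refine h.imp ?_
  intro a b hab
  rw [Bool.eq_false_iff] at hab
  simp only [pvBefore, ne_eq, Bool.or_eq_true, Bool.and_eq_true, Bool.not_eq_true',
    decide_eq_true_eq, decide_eq_false_iff_not] at hab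
  omega

-- ---- the events list ----
lemma eventsA_flat (arrays : List (List Int)) :
    pvEventsA arrays = (PySem.List.enumerate arrays 0).flatMap (fun p =>
      (PySem.List.enumerate p.2 0).map (fun q => (q.2, p.1, q.1))) := by
  unfold pvEventsA
  calc (PySem.List.enumerate arrays 0).foldl (fun ev p =>
          (PySem.List.enumerate p.2 0).foldl (fun ev2 q => ev2 ++ [(q.2, p.1, q.1)]) ev) []
      = (PySem.List.enumerate arrays 0).foldl (fun ev p =>
          ev ++ (PySem.List.enumerate p.2 0).map (fun q => (q.2, p.1, q.1))) [] :=
        PySem.List.foldl_congr_mem _ _ _ _ (fun acc x _ => PySem.List.foldl_append_singleton_eq_map _ _ _)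
    _ = [] ++ (PySem.List.enumerate arrays 0).flatMap (fun p =>
          (PySem.List.enumerate p.2 0).map (fun q => (q.2, p.1, q.1))) :=
        by apply PySem.List.foldl_append_eq_flatMap
    _ = _ := by simp

lemma eventsA_bounds (arrays : List (List Int)) :
    ∀ e ∈ pvEventsA arrays, e.2.1.toNat < arrays.length ∧ 0 ≤ e.2.2 := by
  rw [eventsA_flat]
  intro e he
  obtain ⟨p, hp, he2⟩ := List.mem_flatMap.mp he
  obtain ⟨q, hq, rfl⟩ := List.mem_map.mp he2
  obtain ⟨k, hk, rfl⟩ := (PySem.List.mem_enumerate_iff _ _ _).mp hp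
  obtain ⟨m, hm, rfl⟩ := (PySem.List.mem_enumerate_iff _ _ _).mp hq
  simp
  omega

-- ---- small getD/set facts ----
lemma getD_set_self (l : List Int) (k : Nat) (v : Int) (hk : k < l.length) :
    (l.set k v).getD k 0 = v := by simp [List.getD, hk]

lemma getD_set_ne (l : List Int) (k m : Nat) (v : Int) (h : k ≠ m) :
    (l.set k v).getD m 0 = l.getD m 0 := by
  simp [List.getD, List.getElem?_set_ne h]

-- ===== A-side: the shrink loop =====
lemma shrinkA_inv (ev : List (Int × Int × Int)) (eps t : Int) (n : Nat)
    (pre : List (Int × Int × Int))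
    (hpre : ∀ q < pre.length, ev[q]? = pre[q]?)
    (hplen : 0 < pre.length)
    (hstop : ∃ el, pre[pre.length - 1]? = some el ∧ t - el.1 ≤ eps)
    (hbpre : ∀ x ∈ pre, x.2.1.toNat < n) :
    ∀ fuel left count,
      left ≤ pre.length - 1 →
      pre.length - 1 - left ≤ fuel →
      count.length = n →
      (∀ i < n, count.getD i 0 = (((pre.drop left).countP (fun x => x.2.1.toNat == i) : Nat) : Int)) →
      (∀ q < left, ∀ x, pre[q]? = some x → eps < t - x.1) →
      ∃ left' count',
        pvShrinkA ev eps t fuel count left = (count', left') ∧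
        left ≤ left' ∧ left' ≤ pre.length - 1 ∧
        count'.length = n ∧
        (∀ i < n, count'.getD i 0 = (((pre.drop left').countP (fun x => x.2.1.toNat == i) : Nat) : Int)) ∧
        (∀ q < left', ∀ x, pre[q]? = some x → eps < t - x.1) ∧
        (∃ xl, pre[left']? = some xl ∧ ¬ eps < t - xl.1) := by
  intro fuel
  induction fuel with
  | zero =>
    intro left count hl hfuel hcl hcnt hold
    have hleq : left = pre.length - 1 := by omega
    obtain ⟨el, hel, helt⟩ := hstop
    refine ⟨left, count, by simp [pvShrinkA], le_refl _, hl, hcl, hcnt, hold, el, ?_, by omega⟩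
    rw [hleq]; exact hel
  | succ fuel ih =>
    intro left count hl hfuel hcl hcnt hold
    have hlt : left < pre.length := by omega
    have hevl : ev[left]? = pre[left]? := hpre left hlt
    have hx : pre[left]? = some pre[left] := List.getElem?_eq_getElem hlt
    by_cases hcond : eps < t - pre[left].1
    · -- the loop advances; left ≠ pre.length - 1 because the condition fails there
      obtain ⟨el, hel, helt⟩ := hstop
      have hne : left ≠ pre.length - 1 := by
        intro hleq
        have hxel : pre[left]? = some el := by rw [hleq]; exact hel
        rw [hx] at hxel
        injection hxel with h'
        rw [h'] at hcond
        omega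
      have hlt1 : left + 1 ≤ pre.length - 1 := by omega
      have hi : pre[left].2.1.toNat < n := hbpre _ (List.getElem_mem hlt)
      have hdrop : pre.drop left = pre[left] :: pre.drop (left + 1) :=
        List.drop_eq_getElem_cons hlt
      have hcnt' : ∀ i < n,
          (count.set pre[left].2.1.toNat (count.getD pre[left].2.1.toNat 0 - 1)).getD i 0
            = (((pre.drop (left + 1)).countP (fun x => x.2.1.toNat == i) : Nat) : Int) := by
        intro i hi'
        have hc := congrArg (List.countP (fun x => x.2.1.toNat == i)) hdrop
        rw [List.countP_cons] at hc
        by_cases hik : pre[left].2.1.toNat = i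
        · subst hik
          rw [getD_set_self _ _ _ (by omega), hcnt _ hi', hc]
          simp
        · rw [getD_set_ne _ _ _ _ hik, hcnt i hi', hc]
          simp [hik]
      have hold' : ∀ q < left + 1, ∀ x, pre[q]? = some x → eps < t - x.1 := by
        intro q hq x hqx
        rcases Nat.lt_succ_iff_lt_or_eq.mp hq with h | rfl
        · exact hold q h x hqx
        · rw [hx] at hqx; injection hqx with h'; rw [← h']; exact hcond
      obtain ⟨left', count', heq, h1, h2, h3, h4, h5, h6⟩ :=
        ih (left + 1) (count.set pre[left].2.1.toNat (count.getD pre[left].2.1.toNat 0 - 1))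
          hlt1 (by omega) (by simp [hcl]) hcnt' hold'
      refine ⟨left', count', ?_, by omega, h2, h3, h4, h5, h6⟩
      rw [pvShrinkA, hevl, hx]
      simp only [hcond, if_true]
      exact heq
    · refine ⟨left, count, ?_, le_refl _, by omega, hcl, hcnt, hold, pre[left], hx, hcond⟩
      rw [pvShrinkA, hevl, hx]
      simp [hcond]

-- after the shrink, A's all(count > 0) test equals the prefix coverage test
lemma good_of_counts (eps t : Int) (n : Nat) (pre : List (Int × Int × Int))
    (hsort : pre.Pairwise (fun a b => a.1 ≤ b.1))
    (left' : Nat) (count' : List Int)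
    (hcnt : ∀ i < n, count'.getD i 0 = (((pre.drop left').countP (fun x => x.2.1.toNat == i) : Nat) : Int))
    (hold : ∀ q < left', ∀ x, pre[q]? = some x → eps < t - x.1)
    (hstop : ∃ xl, pre[left']? = some xl ∧ ¬ eps < t - xl.1) :
    (List.range n).all (fun k => decide (0 < count'.getD k 0)) = pvGood n eps pre t := by
  obtain ⟨xl, hxl, hxlt⟩ := hstop
  have hllen : left' < pre.length := by
    by_contra h
    rw [List.getElem?_eq_none (by omega)] at hxl
    simp at hxl
  have hxl' : pre[left'] = xl := by
    rw [List.getElem?_eq_getElem hllen] at hxl; injection hxl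
  -- every element of the tail window is within epsilon of t
  have htail : ∀ x ∈ pre.drop left', t - x.1 ≤ eps := by
    intro x hxm
    obtain ⟨k, hk, hkx⟩ := List.getElem_of_mem hxm
    rw [List.length_drop] at hk
    have hkx' : pre[left' + k]'(by omega) = x := by
      rw [← hkx, List.getElem_drop]
    have hmono : xl.1 ≤ x.1 := by
      rcases Nat.eq_zero_or_pos k with rfl | hkpos
      · simp only [Nat.add_zero] at hkx'
        rw [hxl'] at hkx'
        exact le_of_eq (by rw [hkx'])
      · have hpp := (List.pairwise_iff_getElem.mp hsort) left' (left' + k)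
          (by omega) (by omega) (by omega)
        rw [hxl', hkx'] at hpp
        exact hpp
    omega
  unfold pvGood
  rw [Bool.eq_iff_iff]
  simp only [List.all_eq_true, List.mem_range, decide_eq_true_eq, List.any_eq_true,
    Bool.and_eq_true, beq_iff_eq]
  constructor
  · intro H i hi
    have := H i hi
    rw [hcnt i hi] at this
    have hpos : 0 < (pre.drop left').countP (fun x => x.2.1.toNat == i) := by
      exact_mod_cast this
    obtain ⟨x, hxm, hxp⟩ := List.countP_pos_iff.mp hpos
    exact ⟨x, List.mem_of_mem_drop hxm, by simpa using hxp, by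
      have := htail x hxm; exact this⟩
  · intro H i hi
    obtain ⟨x, hxm, hxi, hxt⟩ := H i hi
    rw [hcnt i hi]
    have hxw : x ∈ pre.drop left' := by
      obtain ⟨q, hq, hqx⟩ := List.getElem_of_mem hxm
      have hql : left' ≤ q := by
        by_contra hc
        have := hold q (by omega) x (by rw [List.getElem?_eq_getElem hq, hqx])
        omega
      have h3 : (pre.drop left')[q - left']? = some x := by
        rw [List.getElem?_drop, show left' + (q - left') = q by omega,
          List.getElem?_eq_getElem hq, hqx]
      exact List.mem_of_getElem? h3
    have hpos : 0 < (pre.drop left').countP (fun x => x.2.1.toNat == i) :=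
      List.countP_pos_iff.mpr ⟨x, hxw, by simpa using hxi⟩
    exact_mod_cast hpos

-- ===== A's loop equals the reference loop =====
lemma loopA_ref (ev : List (Int × Int × Int)) (eps : Int) (n : Nat)
    (heps : 0 ≤ eps)
    (hb : ∀ x ∈ ev, x.2.1.toNat < n)
    (hs : ev.Pairwise (fun a b => a.1 ≤ b.1)) :
    ∀ rest pre count left result,
      ev = pre ++ rest →
      left ≤ pre.length →
      count.length = n →
      (∀ i < n, count.getD i 0 = (((pre.drop left).countP (fun x => x.2.1.toNat == i) : Nat) : Int)) →
      (∀ q < left, ∀ x, pre[q]? = some x → ∀ y ∈ rest, eps < y.1 - x.1) →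
      pvLoopA ev eps n rest count left result = pvRef eps n pre rest result := by
  intro rest
  induction rest with
  | nil => intro pre count left result _ _ _ _ _; simp [pvLoopA, pvRef]
  | cons e rest ih =>
    intro pre count left result hev hl hcl hcnt hold
    have hi : e.2.1.toNat < n := hb e (by rw [hev]; simp)
    have hilen : e.2.1.toNat < count.length := by omega
    -- incremented count is the window count over pre ++ [e]
    have hdropapp : (pre ++ [e]).drop left = pre.drop left ++ [e] :=
      List.drop_append_of_le_length hl
    have hcnt1 : ∀ i < n,
        (count.set e.2.1.toNat (count.getD e.2.1.toNat 0 + 1)).getD i 0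
          = ((((pre ++ [e]).drop left).countP (fun x => x.2.1.toNat == i) : Nat) : Int) := by
      intro i hi'
      rw [hdropapp, List.countP_append]
      by_cases hik : e.2.1.toNat = i
      · subst hik
        rw [getD_set_self _ _ _ hilen, hcnt _ hi']
        simp
      · rw [getD_set_ne _ _ _ _ hik, hcnt i hi']
        simp [hik]
    -- old excluded positions stay excluded for the new, larger timestamp
    have hold1 : ∀ q < left, ∀ x, (pre ++ [e])[q]? = some x → eps < e.1 - x.1 := by
      intro q hq x hqx
      rw [List.getElem?_append_left (by omega)] at hqx
      exact hold q hq x hqx (e) (by simp)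
    -- the shrink loop
    have hpre' : ∀ q < (pre ++ [e]).length, ev[q]? = (pre ++ [e])[q]? := by
      intro q hq
      rw [hev, show pre ++ e :: rest = (pre ++ [e]) ++ rest by simp]
      exact (List.getElem?_append_left hq)

    have hstop : ∃ el, (pre ++ [e])[(pre ++ [e]).length - 1]? = some el ∧ e.1 - el.1 ≤ eps := by
      refine ⟨e, ?_, by omega⟩
      simp
    have hbpre : ∀ x ∈ pre ++ [e], x.2.1.toNat < n := by
      intro x hx
      apply hb
      rw [hev, show pre ++ e :: rest = (pre ++ [e]) ++ rest by simp]
      exact List.mem_append_left _ hx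
    obtain ⟨left', count', heq, h1, h2, h3, h4, h5, h6⟩ :=
      shrinkA_inv ev eps e.1 n (pre ++ [e]) hpre' (by simp) hstop hbpre
        ev.length left (count.set e.2.1.toNat (count.getD e.2.1.toNat 0 + 1))
        (by simp; omega) (by rw [hev]; simp; omega) (by simp [hcl]) hcnt1 hold1
    -- sortedness of the processed prefix
    have hsplit : ev = (pre ++ [e]) ++ rest := by rw [hev]; simp
    have hsort' : (pre ++ [e]).Pairwise (fun a b => a.1 ≤ b.1) := by
      rw [hsplit, List.pairwise_append] at hs
      exact hs.1
    have hgood := good_of_counts eps e.1 n (pre ++ [e]) hsort' left' count' h4 h5 h6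
    -- the cross fact: pre++[e] elements come before rest elements
    have hcross : ∀ a ∈ pre ++ [e], ∀ b ∈ rest, a.1 ≤ b.1 := by
      rw [hsplit, List.pairwise_append] at hs
      exact hs.2.2
    have hold' : ∀ q < left', ∀ x, (pre ++ [e])[q]? = some x → ∀ y ∈ rest, eps < y.1 - x.1 := by
      intro q hq x hqx y hy
      have h1' := h5 q hq x hqx
      have h2' : x.1 ≤ e.1 → e.1 ≤ y.1 → eps < y.1 - x.1 := by omega
      have hxm : x ∈ pre ++ [e] := List.mem_of_getElem? hqx
      have : e.1 ≤ y.1 := hcross e (by simp) y hy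
      omega
    have hrec : ∀ res, pvLoopA ev eps n rest count' left' res = pvRef eps n (pre ++ [e]) rest res := by
      intro res
      exact ih (pre ++ [e]) count' left' res hsplit (by omega) h3 h4 hold'
    simp only [pvLoopA, pvRef, heq, hgood]
    by_cases hg : pvGood n eps (pre ++ [e]) e.1 = true
    · simp only [hg, if_true]
      by_cases hfull : (result.set e.2.1.toNat e.2.2).all (fun r => r != -1) = true
      · simp [hfull]
      · simp only [Bool.not_eq_true] at hfull
        simp [hfull, hrec]
    · simp only [Bool.not_eq_true] at hg
      simp [hg, hrec]

-- ===== B-side: the latest-timestamp invariant =====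
def pvLastInv (n : Nat) (pre : List (Int × Int × Int)) (last : List (Option Int)) : Prop :=
  ∀ i < n, (last.getD i none = none ∧ ∀ x ∈ pre, x.2.1.toNat ≠ i)
         ∨ (∃ v, last.getD i none = some v ∧ (∃ x ∈ pre, x.2.1.toNat = i ∧ x.1 = v)
               ∧ ∀ x ∈ pre, x.2.1.toNat = i → x.1 ≤ v)

lemma lastInv_check (eps t : Int) (n : Nat) (pre : List (Int × Int × Int))
    (last : List (Option Int)) (hlen : last.length = n)
    (hinv : pvLastInv n pre last) :
    last.all (fun v => match v with
                       | some w => decide (t - w ≤ eps)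
                       | none => false) = pvGood n eps pre t := by
  unfold pvGood
  rw [Bool.eq_iff_iff]
  simp only [List.all_eq_true, List.mem_range, List.any_eq_true, Bool.and_eq_true,
    beq_iff_eq, decide_eq_true_eq]
  rw [List.forall_mem_iff_forall_getElem]
  constructor
  · intro H i hi
    have hil : i < last.length := by omega
    have := H i hil
    rcases hinv i hi with ⟨hnone, _⟩ | ⟨v, hsome, ⟨x, hxm, hxi, hxv⟩, _⟩
    · rw [List.getD_eq_getElem _ _ hil] at hnone
      rw [hnone] at this
      exact absurd this (by simp)
    · rw [List.getD_eq_getElem _ _ hil] at hsome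
      rw [hsome] at this
      simp only [decide_eq_true_eq] at this
      exact ⟨x, hxm, hxi, by omega⟩
  · intro H i hil
    have hi : i < n := by omega
    obtain ⟨x, hxm, hxi, hxt⟩ := H i hi
    rcases hinv i hi with ⟨_, hno⟩ | ⟨v, hsome, _, hmax⟩
    · exact absurd hxi (hno x hxm)
    · rw [List.getD_eq_getElem _ _ (by omega)] at hsome
      rw [hsome]
      simp only [decide_eq_true_eq]
      have := hmax x hxm hxi
      omega

-- ===== B's loop equals the reference loop =====
lemma loopB_ref (eps : Int) (n : Nat) :
    ∀ rest pre last result,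
      (∀ x ∈ pre ++ rest, x.2.1.toNat < n) →
      (pre ++ rest).Pairwise (fun a b => a.1 ≤ b.1) →
      last.length = n →
      pvLastInv n pre last →
      pvLoopB eps rest last result = pvRef eps n pre rest result := by
  intro rest
  induction rest with
  | nil => intro pre last result _ _ _ _; simp [pvLoopB, pvRef]
  | cons e rest ih =>
    intro pre last result hb hs hlen hinv
    have hi : e.2.1.toNat < n := hb e (by simp)
    have hsplit : pre ++ e :: rest = (pre ++ [e]) ++ rest := by simp
    have hcross : ∀ a ∈ pre, a.1 ≤ e.1 := by
      rw [List.pairwise_append] at hs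
      intro a ha
      exact hs.2.2 a ha e (by simp)
    -- the updated invariant
    have hinv1 : pvLastInv n (pre ++ [e]) (last.set e.2.1.toNat (some e.1)) := by
      intro k hk
      by_cases hik : e.2.1.toNat = k
      · right
        refine ⟨e.1, ?_, ⟨e, by simp, hik, rfl⟩, ?_⟩
        · rw [← hik]
          simp [List.getD, List.getElem?_set_self (by omega : e.2.1.toNat < last.length)]
        · intro x hx hxk
          rcases List.mem_append.mp hx with hx' | hx'
          · exact hcross x hx'
          · simp at hx'; rw [hx']
      · have hgd : (last.set e.2.1.toNat (some e.1)).getD k none = last.getD k none := by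
          simp [List.getD, List.getElem?_set_ne hik]
        rcases hinv k hk with ⟨hnone, hno⟩ | ⟨v, hsome, hex, hmax⟩
        · left
          refine ⟨by rw [hgd]; exact hnone, ?_⟩
          intro x hx
          rcases List.mem_append.mp hx with hx' | hx'
          · exact hno x hx'
          · simp at hx'; rw [hx']; exact fun hc => hik hc
        · right
          refine ⟨v, by rw [hgd]; exact hsome, ?_, ?_⟩
          · obtain ⟨x, hxm, hxk, hxv⟩ := hex
            exact ⟨x, List.mem_append_left _ hxm, hxk, hxv⟩
          · intro x hx hxk
            rcases List.mem_append.mp hx with hx' | hx'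
            · exact hmax x hx' hxk
            · simp at hx'; rw [hx'] at hxk; exact absurd hxk hik
    have hchk := lastInv_check eps e.1 n (pre ++ [e]) (last.set e.2.1.toNat (some e.1))
      (by simp [hlen]) hinv1
    have hb' : ∀ x ∈ (pre ++ [e]) ++ rest, x.2.1.toNat < n := by rw [← hsplit]; exact hb
    have hs' : ((pre ++ [e]) ++ rest).Pairwise (fun a b => a.1 ≤ b.1) := by
      rw [← hsplit]; exact hs
    have hrec : ∀ res, pvLoopB eps rest (last.set e.2.1.toNat (some e.1)) res
        = pvRef eps n (pre ++ [e]) rest res := by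
      intro res
      exact ih (pre ++ [e]) _ res hb' hs' (by simp [hlen]) hinv1
    simp only [pvLoopB, pvRef, hchk]
    by_cases hg : pvGood n eps (pre ++ [e]) e.1 = true
    · simp only [hg, if_true]
      by_cases hfull : (result.set e.2.1.toNat e.2.2).all (fun r => r != -1) = true
      · simp [hfull]
      · simp only [Bool.not_eq_true] at hfull
        simp [hfull, hrec]
    · simp only [Bool.not_eq_true] at hg
      simp [hg, hrec]

-- ===== assembling the main theorem =====
lemma events_empty_of_all_nil (arrays : List (List Int)) (h : ∀ a ∈ arrays, a = []) :
    pvEventsA arrays = [] := by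
  rw [eventsA_flat, List.flatMap_eq_nil_iff]
  intro p hp
  obtain ⟨k, hk, rfl⟩ := (PySem.List.mem_enumerate_iff _ _ _).mp hp
  simp [h arrays[k] (List.getElem_mem hk)]

-- ===== VERDICT (by name: the statement is the Claim_ definition above) =====
theorem find_messages_within_epsilon_spec : Claim_equal_find_messages_within_epsilon := by
  intro arrays epsilon _ hpre
  unfold Spec_find_messages_within_epsilon
  unfold find_messages_within_epsilon find_messages_within_epsilon_alt
  rw [← eventsA_flat]
  rcases hpre with heps | hnil
  · -- main case: 0 ≤ epsilon
    set ev := PySem.List.sorted2 (pvEventsA arrays) (fun e => e.1) (fun e => e.2.1) false with hev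
    have hperm := PySem.List.sorted2_perm (pvEventsA arrays) (fun e => e.1) (fun e => e.2.1) false
    have hb : ∀ x ∈ ev, x.2.1.toNat < arrays.length := by
      intro x hx
      exact (eventsA_bounds arrays x (hperm.mem_iff.mp hx)).1
    have hs : ev.Pairwise (fun a b => a.1 ≤ b.1) := sorted2_pairwise_fst _
    have hA := loopA_ref ev epsilon arrays.length heps hb hs ev [] 
      (List.replicate arrays.length 0) 0 (List.replicate arrays.length (-1))
      (by simp) (by simp) (by simp)
      (by intro i hi; simp [List.getD, hi]) (by intro q hq; omega)
    have hB := loopB_ref epsilon arrays.length ev []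
      (List.replicate arrays.length none) (List.replicate arrays.length (-1))
      (by simpa using hb) (by simpa using hs) (by simp)
      (by intro i hi; left; constructor
          · simp [List.getD, hi]
          · intro x hx; exact absurd hx (List.not_mem_nil))
    rw [hA, hB]
  · -- degenerate case: every array is empty, so there are no events at all
    have h0 : pvEventsA arrays = [] := events_empty_of_all_nil arrays hnil
    rw [h0]
    simp [pvLoopA, pvLoopB, PySem.List.sorted2]
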